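-- pv_equiv track=rewrite | github.com/daniel-zeiler/potential-happiness | TakeOne/Stack/Solutions_Four.py | remove_duplicate_value
-- ===== SOURCE A (Python) =====
-- def remove_duplicate_value(s: str, k: int) -> str:
--     stack = []
--     for character in s:
--         stack.append(character)
--         if len(stack) >= k:
--             if len(set(stack[-k:])) == 1:
--                 stack = stack[:len(stack) - k]
--     return ''.join(stack)
-- ===== SOURCE B (Python) =====
-- def remove_duplicate_value(s: str, k: int) -> str:
--     # O(n) stack of (char, run-length) pairs: pop a run the moment it reaches k.
--     stack = []  # (character, count) pairs, top at the end
--     for character in s: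
--         if stack and stack[-1][0] == character:
--             stack[-1] = (character, stack[-1][1] + 1)
--         else:
--             stack.append((character, 1))
--         if stack[-1][1] == k:
--             stack.pop()
--     return ''.join(ch * cnt for ch, cnt in stack)
-- ===== Notes on version B (the rewrite author's own statement) =====
-- stated objective: faster
-- what changed: Replaced A's per-character list slice + set construction over the last k characters with a run-length stack of (char,count) pairs that is popped the moment a run reaches k, doing O(1) work per character.
import Mathlib
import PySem

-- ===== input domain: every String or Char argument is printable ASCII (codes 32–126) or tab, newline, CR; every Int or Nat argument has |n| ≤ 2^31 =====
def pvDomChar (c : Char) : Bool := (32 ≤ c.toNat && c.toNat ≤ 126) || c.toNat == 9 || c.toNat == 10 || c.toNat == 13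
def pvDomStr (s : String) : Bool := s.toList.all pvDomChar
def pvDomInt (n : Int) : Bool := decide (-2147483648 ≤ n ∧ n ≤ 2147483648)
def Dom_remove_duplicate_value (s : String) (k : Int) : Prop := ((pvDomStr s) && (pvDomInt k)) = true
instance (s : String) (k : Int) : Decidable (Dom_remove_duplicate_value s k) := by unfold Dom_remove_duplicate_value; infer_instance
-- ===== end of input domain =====

-- B replaces A's per-character slice/set scan with a run-length stack of (char,count) pairs popped at k (one O(1) step per character).

-- ===== PORT A =====
def pvStepA (k : Int) (stack : List Char) (character : Char) : List Char :=
  let stack := stack ++ [character]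
  if (stack.length : Int) ≥ k then
    if PySem.Set.len (PySem.Set.ofList (PySem.List.slice stack (some (-k)) none)) = 1 then
      PySem.List.slice stack none (some ((stack.length : Int) - k))
    else stack
  else stack

def remove_duplicate_value (s : String) (k : Int) : String :=
  String.mk (s.toList.foldl (pvStepA k) [])

-- ===== PORT B =====
def pvStepB (k : Int) (stack : List (Char × Int)) (character : Char) : List (Char × Int) :=
  let stack :=
    match stack.getLast? with
    | some top =>
        if top.1 = character then stack.dropLast ++ [(character, top.2 + 1)]
        else stack ++ [(character, 1)]
    | none => stack ++ [(character, 1)]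
  match stack.getLast? with
  | some top => if top.2 = k then stack.dropLast else stack
  | none => stack

def remove_duplicate_value_alt (s : String) (k : Int) : String :=
  String.mk ((s.toList.foldl (pvStepB k) []).flatMap (fun p => List.replicate p.2.toNat p.1))

-- ===== PRECONDITION & SPEC =====
def Spec_remove_duplicate_value (s : String) (k : Int) (out : String) : Prop := out = remove_duplicate_value_alt s k
instance (s : String) (k : Int) (out : String) : Decidable (Spec_remove_duplicate_value s k out) := by unfold Spec_remove_duplicate_value; infer_instance

-- ===== CLAIM (what is proved, stated in full; the proofs are below) =====
def Claim_equal_remove_duplicate_value : Prop := ∀ (s : String) (k : Int), Dom_remove_duplicate_value s k → Spec_remove_duplicate_value s k (remove_duplicate_value s k)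

-- ===== LEMMAS AND PROOFS =====

/-- Expansion of B's run-length stack into A's character stack. -/
def pvFlat (bs : List (Char × Int)) : List Char := bs.flatMap (fun p => List.replicate p.2.toNat p.1)

lemma pvFlat_concat (bs : List (Char × Int)) (p : Char × Int) :
    pvFlat (bs ++ [p]) = pvFlat bs ++ List.replicate p.2.toNat p.1 := by
  simp [pvFlat]

/-- Adjacent entries of the run-length stack carry distinct characters. -/
def pvSep : List (Char × Int) → Prop
  | [] => True
  | [_] => True
  | p :: q :: r => p.1 ≠ q.1 ∧ pvSep (q :: r)

lemma pvSep_concat (bs : List (Char × Int)) (q : Char × Int) :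
    pvSep (bs ++ [q]) ↔ pvSep bs ∧ (∀ p, bs.getLast? = some p → p.1 ≠ q.1) := by
  induction bs with
  | nil => simp [pvSep]
  | cons p t ih =>
    cases t with
    | nil => simp [pvSep]
    | cons r t' =>
      simp only [List.cons_append, pvSep, List.getLast?_cons_cons]
      tauto

/-- Invariant of B's stack: separated runs, each of length ≥ 1 and (for k ≥ 1) < k. -/
def pvInv (k : Int) (bs : List (Char × Int)) : Prop :=
  pvSep bs ∧ ∀ p ∈ bs, 1 ≤ p.2 ∧ (1 ≤ k → p.2 < k)

lemma pvFoldl_add_self (m : Nat) (d : Char) :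
    List.foldl PySem.Set.add [d] (List.replicate m d) = [d] := by
  induction m with
  | zero => rfl
  | succ n ih =>
    rw [List.replicate_succ, List.foldl_cons,
       show PySem.Set.add [d] d = [d] from by simp [PySem.Set.add, PySem.Set.contains]]
    exact ih

lemma pvSet_ofList_replicate (m : Nat) (h : 0 < m) (d : Char) :
    PySem.Set.ofList (List.replicate m d) = [d] := by
  obtain ⟨mm, rfl⟩ : ∃ mm, m = mm + 1 := ⟨m - 1, by omega⟩
  rw [PySem.Set.ofList_eq_foldl, List.replicate_succ, List.foldl_cons,
     show PySem.Set.add [] d = [d] from by simp [PySem.Set.add, PySem.Set.contains]]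
  exact pvFoldl_add_self mm d

lemma pvSetLen_replicate (m : Nat) (h : 0 < m) (d : Char) :
    PySem.Set.len (PySem.Set.ofList (List.replicate m d)) = 1 := by
  rw [pvSet_ofList_replicate m h d]; rfl

lemma pvSetLen_ne_one (l : List Char) (a b : Char) (ha : a ∈ l) (hb : b ∈ l) (hab : a ≠ b) :
    ¬ PySem.Set.len (PySem.Set.ofList l) = 1 := by
  intro h
  have hlen : (PySem.Set.ofList l : List Char).length = 1 := by
    have := h
    simp [PySem.Set.len] at this
    omega
  obtain ⟨x, hx⟩ := List.length_eq_one_iff.mp hlen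
  have ha' : a ∈ PySem.Set.ofList l := (PySem.Set.mem_ofList l a).mpr ha
  have hb' : b ∈ PySem.Set.ofList l := (PySem.Set.mem_ofList l b).mpr hb
  rw [hx] at ha' hb'
  simp at ha' hb'
  exact hab (ha'.trans hb'.symm)

lemma pvGetLast_mem_drop {α : Type} (l : List α) (m : Nat) (hm : m < l.length)
    {a : α} (ha : l.getLast? = some a) : a ∈ l.drop m := by
  rw [List.getLast?_eq_getElem?] at ha
  have h1 : l.length - 1 < l.length := by omega
  have h2 : l[l.length - 1] = a := by
    have := ha
    rw [List.getElem?_eq_getElem h1] at this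
    exact Option.some.inj this
  have h3 : l.length - 1 - m < (l.drop m).length := by
    simp [List.length_drop]; omega
  have h4 : (l.drop m)[l.length - 1 - m]'h3 = l[l.length - 1] := by
    rw [List.getElem_drop]; congr 1; omega
  have h5 := List.getElem_mem h3
  rw [h4, h2] at h5
  exact h5

lemma pvFlat_getLast (bs : List (Char × Int)) (p : Char × Int)
    (hp : bs.getLast? = some p) (h1 : 1 ≤ p.2) :
    (pvFlat bs).getLast? = some p.1 := by
  obtain ⟨ys, rfl⟩ := List.getLast?_eq_some_iff.mp hp
  rw [pvFlat_concat]
  obtain ⟨mm, hmm⟩ : ∃ mm, p.2.toNat = mm + 1 := ⟨p.2.toNat - 1, by omega⟩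
  rw [hmm, List.replicate_succ', ← List.append_assoc, List.getLast?_concat]

/-- When k ≤ 0, the truncation slice in A is the whole stack. -/
lemma pvStepA_nonpos (k : Int) (hk : k ≤ 0) (t : List Char) :
    (if PySem.Set.len (PySem.Set.ofList (PySem.List.slice t (some (-k)) none)) = 1 then
      PySem.List.slice t none (some ((t.length : Int) - k))
    else t) = t := by
  by_cases hcond : PySem.Set.len (PySem.Set.ofList (PySem.List.slice t (some (-k)) none)) = 1
  · rw [if_pos hcond, PySem.List.slice_to t (by omega : (0:Int) ≤ (t.length : Int) - k)]
    exact List.take_of_length_le (by omega)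
  · rw [if_neg hcond]

/-- A removes the freshly completed run of length k = m+1. -/
lemma pvStepA_pop (F : List Char) (m : Nat) (d : Char) :
    pvStepA ((m : Int) + 1) (F ++ List.replicate m d) d = F := by
  simp only [pvStepA]
  have ht : (F ++ List.replicate m d) ++ [d] = F ++ List.replicate (m + 1) d := by
    rw [List.replicate_succ', ← List.append_assoc]
  rw [ht]
  have hge : ((F ++ List.replicate (m + 1) d).length : Int) ≥ (m : Int) + 1 := by
    simp [List.length_append, List.length_replicate]
  rw [if_pos hge]
  have hsl : PySem.List.slice (F ++ List.replicate (m + 1) d) (some (-((m : Int) + 1))) none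
      = List.replicate (m + 1) d := by
    have hneg : -((m : Int) + 1) = -(((m + 1 : Nat)) : Int) := by push_cast; ring
    rw [hneg, PySem.List.slice_from_neg_natCast _ (m + 1) (by omega)]
    have hlen : (F ++ List.replicate (m + 1) d).length - (m + 1) = F.length := by simp
    rw [hlen]
    exact List.drop_left
  rw [hsl, if_pos (pvSetLen_replicate (m + 1) (by omega) d)]
  have h2 : ((F ++ List.replicate (m + 1) d).length : Int) - ((m : Int) + 1) = (F.length : Int) := by
    simp [List.length_append, List.length_replicate]
  rw [h2, PySem.List.slice_to _ (Int.natCast_nonneg _)]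
  simp

/-- A leaves the stack unchanged (apart from the push) when the last k entries are not all equal. -/
lemma pvStepA_keep (st : List Char) (c : Char) (k : Int)
    (h : 2 ≤ k → k ≤ (st.length : Int) + 1 →
        ∃ a b, a ≠ b ∧ a ∈ (st ++ [c]).drop (st.length + 1 - k.toNat)
                     ∧ b ∈ (st ++ [c]).drop (st.length + 1 - k.toNat))
    (hk1 : k ≠ 1) :
    pvStepA k st c = st ++ [c] := by
  simp only [pvStepA]
  by_cases hge : ((st ++ [c]).length : Int) ≥ k
  · rw [if_pos hge]
    by_cases hk0 : k ≤ 0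
    · exact pvStepA_nonpos k hk0 _
    · have hk2 : 2 ≤ k := by omega
      have hle : k ≤ (st.length : Int) + 1 := by
        have : ((st ++ [c]).length : Int) = (st.length : Int) + 1 := by
          simp
        omega
      obtain ⟨a, b, hab, ha, hb⟩ := h hk2 hle
      have hksl : PySem.List.slice (st ++ [c]) (some (-k)) none
          = (st ++ [c]).drop (st.length + 1 - k.toNat) := by
        have hneg : -k = -((k.toNat : Nat) : Int) := by omega
        rw [hneg, PySem.List.slice_from_neg_natCast _ k.toNat (by omega)]
        congr 1
        simp
      rw [hksl, if_neg (pvSetLen_ne_one _ a b ha hb hab)]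
  · rw [if_neg hge]

/-- The key simulation step: one A-step on the flattened stack equals flattening one B-step. -/
lemma pvStep_eq (k : Int) (bs : List (Char × Int)) (c : Char) (h : pvInv k bs) :
    pvStepA k (pvFlat bs) c = pvFlat (pvStepB k bs c) ∧ pvInv k (pvStepB k bs c) := by
  obtain ⟨hsep, hcnt⟩ := h
  rcases List.eq_nil_or_concat bs with rfl | ⟨bs', p, hbs⟩
  · -- empty stack
    have hB : pvStepB k [] c = if (1 : Int) = k then [] else [(c, 1)] := by
      simp [pvStepB]
    by_cases hk : (1 : Int) = k
    · subst hk
      refine ⟨?_, ?_⟩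
      · rw [hB, if_pos rfl]
        show pvStepA ((0 : Int) + 1) (pvFlat []) c = pvFlat []
        have h0 := pvStepA_pop [] 0 c
        simpa [pvFlat] using h0
      · rw [hB, if_pos rfl]
        exact ⟨by simp [pvSep], by simp⟩
    · have hk1 : k ≠ 1 := fun e => hk e.symm
      refine ⟨?_, ?_⟩
      · rw [hB, if_neg hk]
        have hfl : pvFlat [(c, 1)] = [c] := by simp [pvFlat]
        rw [hfl]
        have hkeep := pvStepA_keep [] c k
          (fun hk2 hkle => absurd hkle (by simp; omega)) hk1
        simpa [pvFlat] using hkeep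
      · rw [hB, if_neg hk]
        refine ⟨by simp [pvSep], ?_⟩
        intro q hq
        simp at hq
        subst hq
        exact ⟨by norm_num, fun hke => by omega⟩
  · rw [List.concat_eq_append] at hbs
    subst hbs
    obtain ⟨hsep', hlast⟩ := (pvSep_concat bs' p).mp hsep
    have hp := hcnt p (List.mem_append_right _ (by simp))
    have hk1 : k ≠ 1 := by
      intro e
      have := hp.2 (by omega)
      omega
    have hN1 : 1 ≤ p.2.toNat := by omega
    by_cases hc : p.1 = c
    · -- top run continues
      have hB : pvStepB k (bs' ++ [p]) c =
          if p.2 + 1 = k then bs' else bs' ++ [(c, p.2 + 1)] := by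
        simp [pvStepB, hc]
      have hflat : pvFlat (bs' ++ [p]) = pvFlat bs' ++ List.replicate p.2.toNat c := by
        rw [pvFlat_concat, hc]
      by_cases hnk : p.2 + 1 = k
      · refine ⟨?_, ?_⟩
        · rw [hB, if_pos hnk, hflat]
          have hkval : k = (p.2.toNat : Int) + 1 := by omega
          rw [hkval]
          exact pvStepA_pop (pvFlat bs') p.2.toNat c
        · rw [hB, if_pos hnk]
          exact ⟨hsep', fun q hq => hcnt q (List.mem_append_left _ hq)⟩
      · have hpk2 : 1 ≤ k → p.2 + 1 < k := by
          intro hge1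
          have := hp.2 hge1
          omega
        refine ⟨?_, ?_⟩
        · rw [hB, if_neg hnk, hflat, pvFlat_concat]
          have hrep : (p.2 + 1).toNat = p.2.toNat + 1 := by omega
          rw [hrep, List.replicate_succ', ← List.append_assoc]
          apply pvStepA_keep _ _ _ ?_ hk1
          intro hk2 hkle
          have hkt : p.2.toNat + 2 ≤ k.toNat := by
            have := hpk2 (by omega)
            omega
          have hkle' : k.toNat ≤ (pvFlat bs').length + p.2.toNat + 1 := by
            have hl : (pvFlat bs' ++ List.replicate p.2.toNat c).length
                = (pvFlat bs').length + p.2.toNat := by simp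
            omega
          have hidx : (pvFlat bs' ++ List.replicate p.2.toNat c).length + 1 - k.toNat
              = (pvFlat bs').length + p.2.toNat + 1 - k.toNat := by simp
          have hm : (pvFlat bs').length + p.2.toNat + 1 - k.toNat < (pvFlat bs').length := by
            omega
          have hFpos : 0 < (pvFlat bs').length := by omega
          have hsplit : ((pvFlat bs' ++ List.replicate p.2.toNat c) ++ [c]).drop
                ((pvFlat bs' ++ List.replicate p.2.toNat c).length + 1 - k.toNat)
              = (pvFlat bs').drop ((pvFlat bs').length + p.2.toNat + 1 - k.toNat)
                ++ (List.replicate p.2.toNat c ++ [c]) := by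
            rw [hidx, List.append_assoc]
            exact List.drop_append_of_le_length (by omega)
          cases hq : bs'.getLast? with
          | none =>
            rw [List.getLast?_eq_none_iff] at hq
            subst hq
            simp [pvFlat] at hFpos
          | some q =>
            obtain ⟨ys, hys⟩ := List.getLast?_eq_some_iff.mp hq
            have hqmem : q ∈ bs' := by rw [hys]; simp
            have hq1 : q.1 ≠ c := by
              have := hlast q hq
              rwa [hc] at this
            have hq2 : 1 ≤ q.2 := (hcnt q (List.mem_append_left _ hqmem)).1
            have hqF : q.1 ∈ (pvFlat bs').drop ((pvFlat bs').length + p.2.toNat + 1 - k.toNat) :=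
              pvGetLast_mem_drop _ _ hm (pvFlat_getLast bs' q hq hq2)
            refine ⟨q.1, c, hq1, ?_, ?_⟩
            · rw [hsplit]; exact List.mem_append_left _ hqF
            · rw [hsplit]; exact List.mem_append_right _ (by simp)
        · rw [hB, if_neg hnk]
          refine ⟨?_, ?_⟩
          · rw [pvSep_concat]
            refine ⟨hsep', fun q hq => ?_⟩
            have := hlast q hq
            rwa [hc] at this
          · intro q hq
            rcases List.mem_append.mp hq with hq | hq
            · exact hcnt q (List.mem_append_left _ hq)
            · simp at hq
              subst hq
              exact ⟨by omega, fun hge1 => by have := hpk2 hge1; omega⟩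
    · -- new run starts
      have hB : pvStepB k (bs' ++ [p]) c =
          if (1 : Int) = k then bs' ++ [p] else (bs' ++ [p]) ++ [(c, 1)] := by
        simp [pvStepB, hc]
      have hkne : ¬ ((1 : Int) = k) := fun e => hk1 e.symm
      refine ⟨?_, ?_⟩
      · rw [hB, if_neg hkne, pvFlat_concat (bs' ++ [p]) (c, 1)]
        have hone : List.replicate ((c, (1 : Int)).2).toNat c = [c] := by simp
        rw [hone]
        apply pvStepA_keep _ _ _ ?_ hk1
        intro hk2 hkle
        have hstlen : (pvFlat (bs' ++ [p])).length = (pvFlat bs').length + p.2.toNat := by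
          rw [pvFlat_concat]; simp
        have hm : (pvFlat (bs' ++ [p])).length + 1 - k.toNat < (pvFlat (bs' ++ [p])).length := by
          omega
        have hstlast : (pvFlat (bs' ++ [p])).getLast? = some p.1 :=
          pvFlat_getLast _ p List.getLast?_concat hp.1
        have hdropt : (pvFlat (bs' ++ [p]) ++ [c]).drop ((pvFlat (bs' ++ [p])).length + 1 - k.toNat)
            = (pvFlat (bs' ++ [p])).drop ((pvFlat (bs' ++ [p])).length + 1 - k.toNat) ++ [c] := by
          exact List.drop_append_of_le_length (by omega)
        refine ⟨p.1, c, hc, ?_, ?_⟩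
        · rw [hdropt]
          exact List.mem_append_left _ (pvGetLast_mem_drop _ _ hm hstlast)
        · rw [hdropt]; exact List.mem_append_right _ (by simp)
      · rw [hB, if_neg hkne]
        refine ⟨?_, ?_⟩
        · rw [pvSep_concat]
          refine ⟨hsep, fun q hq => ?_⟩
          rw [List.getLast?_concat] at hq
          cases hq
          exact hc
        · intro q hq
          rcases List.mem_append.mp hq with hq | hq
          · exact hcnt q hq
          · simp at hq
            subst hq
            exact ⟨by norm_num, fun hge1 => by omega⟩

lemma pvFold (k : Int) (l : List Char) (bs : List (Char × Int)) (h : pvInv k bs) :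
    l.foldl (pvStepA k) (pvFlat bs) = pvFlat (l.foldl (pvStepB k) bs) ∧
      pvInv k (l.foldl (pvStepB k) bs) := by
  induction l generalizing bs with
  | nil => exact ⟨rfl, h⟩
  | cons c t ih =>
    obtain ⟨h1, h2⟩ := pvStep_eq k bs c h
    simpa [List.foldl_cons, h1] using ih _ h2

-- ===== VERDICT (by name: the statement is the Claim_ definition above) =====
theorem remove_duplicate_value_spec : Claim_equal_remove_duplicate_value := by
  unfold Claim_equal_remove_duplicate_value
  intro s k _
  show remove_duplicate_value s k = remove_duplicate_value_alt s k
  simp only [remove_duplicate_value, remove_duplicate_value_alt]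
  have h := (pvFold k s.toList [] ⟨by simp [pvSep], by simp⟩).1
  exact congrArg String.mk (by simpa [pvFlat] using h)
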